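-- pv_equiv track=rewrite | github.com/vinaykashyaphr/Launchpad | launchpad/Finals/QA/beyond_measure_0_4_wcn.py | printout
-- ===== SOURCE A (Python) =====
-- def printout(textblocks):
--     page = 0
--     text = ''
--
--     for block in textblocks:
--         if block[1] != page:
--             text += f'\nPAGE NUMBER: {block[1]}\n'
--             page = block[1]
--         text += f'{block[0]}'
--
--     return text
-- ===== SOURCE B (Python) =====
-- def printout(textblocks):
--     parts = []
--     page = 0
--     i = 0
--     n = len(textblocks)
--     while i < n:
--         p = textblocks[i][1]
--         j = i
--         while j < n and textblocks[j][1] == p: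
--             j += 1
--         if p != page:
--             parts.append(f'\nPAGE NUMBER: {p}\n')
--             page = p
--         parts.append(''.join(f'{b[0]}' for b in textblocks[i:j]))
--         i = j
--     return ''.join(parts)
-- ===== Notes on version B (the rewrite author's own statement) =====
-- stated objective: alternative
-- what changed: Replaces the flat per-block scan that mutates a growing string with a two-level grouped pass: group maximal runs of consecutive blocks with equal page number, emit one header per run that changes the tracked page, and join collected parts once at the end.
import Mathlib
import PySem

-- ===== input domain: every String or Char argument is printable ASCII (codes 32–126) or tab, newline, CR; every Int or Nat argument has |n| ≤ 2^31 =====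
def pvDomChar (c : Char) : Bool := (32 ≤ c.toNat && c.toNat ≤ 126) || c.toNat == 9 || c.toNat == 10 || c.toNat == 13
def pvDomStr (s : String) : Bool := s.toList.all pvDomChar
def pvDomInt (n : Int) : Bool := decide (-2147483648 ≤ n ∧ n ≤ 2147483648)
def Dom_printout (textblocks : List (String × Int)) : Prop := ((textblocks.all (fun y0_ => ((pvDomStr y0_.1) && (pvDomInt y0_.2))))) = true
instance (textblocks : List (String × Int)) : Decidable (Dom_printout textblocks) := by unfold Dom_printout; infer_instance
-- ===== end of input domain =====

-- ===== PORT A =====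
-- B groups maximal runs of equal consecutive page numbers instead of A's flat per-block scan (objective: alternative decomposition).
def printoutStep (st : Int × String) (b : String × Int) : Int × String :=
  if b.2 ≠ st.1 then (b.2, st.2 ++ "\nPAGE NUMBER: " ++ PySem.Int.toStr b.2 ++ "\n" ++ b.1)
  else (st.1, st.2 ++ b.1)

def printout (textblocks : List (String × Int)) : String :=
  (textblocks.foldl printoutStep (0, "")).2

-- ===== PORT B =====
-- transcription of Source B: the inner while loop scanning the run is takeWhile/dropWhile;
-- each iteration of the outer while loop is one recursive call on the remainder.
def printoutAux (page : Int) (bs : List (String × Int)) : String :=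
  match bs with
  | [] => ""
  | (s, p) :: rest =>
    let grp := rest.takeWhile (fun b => b.2 == p)
    let rest' := rest.dropWhile (fun b => b.2 == p)
    (if p ≠ page then "\nPAGE NUMBER: " ++ PySem.Int.toStr p ++ "\n" else "")
      ++ (s ++ String.join (grp.map (·.1)))
      ++ printoutAux p rest'
termination_by bs.length
decreasing_by
  simp only [List.length_cons]
  exact Nat.lt_succ_of_le (List.length_dropWhile_le _ _)

def printout_alt (textblocks : List (String × Int)) : String :=
  printoutAux 0 textblocks

-- ===== PRECONDITION & SPEC =====
def Spec_printout (textblocks : List (String × Int)) (out : String) : Prop := out = printout_alt textblocks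
instance (textblocks : List (String × Int)) (out : String) : Decidable (Spec_printout textblocks out) := by unfold Spec_printout; infer_instance

-- ===== CLAIM (what is proved, stated in full; the proofs are below) =====
def Claim_equal_printout : Prop := ∀ (textblocks : List (String × Int)), Dom_printout textblocks → Spec_printout textblocks (printout textblocks)

-- ===== LEMMAS AND PROOFS =====

theorem foldl_strapp (l : List String) : ∀ (x : String),
    List.foldl (fun r s => r ++ s) x l = x ++ List.foldl (fun r s => r ++ s) "" l := by
  induction l with
  | nil => intro x; simp
  | cons a l ih =>
    intro x
    simp only [List.foldl_cons]
    rw [ih (x ++ a), ih ("" ++ a)]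
    simp [String.append_assoc]

-- folding A's step over a run whose blocks all carry the current page just appends their texts
theorem printout_foldl_same (bs : List (String × Int)) : ∀ (p : Int) (text : String),
    (∀ b ∈ bs, b.2 = p) →
    List.foldl printoutStep (p, text) bs = (p, text ++ String.join (bs.map (·.1))) := by
  induction bs with
  | nil => intro p text _; simp [String.join]
  | cons b rest ih =>
    intro p text h
    have hb : b.2 = p := h b (by simp)
    simp only [List.foldl_cons, printoutStep, hb, ne_eq, not_true_eq_false, if_false,
      List.map_cons, String.join]
    rw [ih p _ (fun x hx => h x (by simp [hx]))]
    simp only [String.join]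
    rw [foldl_strapp _ ("" ++ b.1)]
    simp [String.append_assoc]

theorem printout_main (n : Nat) : ∀ (bs : List (String × Int)), bs.length ≤ n →
    ∀ (page : Int) (text : String),
    (List.foldl printoutStep (page, text) bs).2 = text ++ printoutAux page bs := by
  induction n with
  | zero =>
    intro bs hbs page text
    have : bs = [] := List.eq_nil_of_length_eq_zero (Nat.le_zero.mp hbs)
    subst this; simp [printoutAux]
  | succ n ih =>
    intro bs hbs page text
    match bs with
    | [] => simp [printoutAux]
    | (s, p) :: rest =>
      have hsplit : rest.takeWhile (fun b => b.2 == p) ++ rest.dropWhile (fun b => b.2 == p) = rest :=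
        List.takeWhile_append_dropWhile
      have hgrp : ∀ b ∈ rest.takeWhile (fun b => b.2 == p), b.2 = p := by
        intro b hb
        simpa using List.mem_takeWhile_imp hb
      have hlen : (rest.dropWhile (fun b => b.2 == p)).length ≤ n := by
        have := List.length_dropWhile_le (fun b => (b.2 == p)) rest
        simp only [List.length_cons] at hbs
        omega
      rw [printoutAux]
      simp only [List.foldl_cons]
      rw [← hsplit, List.foldl_append]
      have hstep : printoutStep (page, text) (s, p) =
          (p, text ++ (if p ≠ page then "\nPAGE NUMBER: " ++ PySem.Int.toStr p ++ "\n" else "") ++ s) := by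
        by_cases hpp : p = page
        · subst hpp; simp [printoutStep]
        · simp [printoutStep, hpp, String.append_assoc]
      rw [hstep, printout_foldl_same _ p _ hgrp, ih _ hlen]
      simp [String.append_assoc]

-- ===== VERDICT (by name: the statement is the Claim_ definition above) =====
theorem printout_spec : Claim_equal_printout := by
  intro tb _
  unfold Spec_printout printout printout_alt
  simpa using printout_main tb.length tb (le_refl _) 0 ""
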